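-- pv_equiv track=rewrite | github.com/lim4373/study | 프로그래머스/unrated/181932. 코드 처리하기/코드 처리하기.py | solution
-- ===== SOURCE A (Python) =====
-- def solution(code):
--     answer = ''
--     mode = 0
--
--
--     for idx, val in enumerate(code):
--         if val == "1":
--             mode = 0 if mode == 1 else 1
--         if mode == 0:
--             if idx % 2 == 0 and val != "1":
--                 answer += val
--         else:
--             if idx % 2 == 1 and val != "1":
--                 answer += val
--
--     return answer if answer!="" else "EMPTY"
-- ===== SOURCE B (Python) =====
-- def solution(code):
--     # A keeps a non-'1' char at index i iff i % 2 equals the parity of the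
--     # number of '1's before it; since i = (#'1's before) + (#others before),
--     # that is exactly: the number of preceding non-'1' chars is even.
--     # So: delete every '1', then take every other remaining char.
--     kept = code.replace('1', '')[::2]
--     return kept if kept else 'EMPTY'
-- ===== Notes on version B (the rewrite author's own statement) =====
-- stated objective: simpler
-- what changed: Replaced A's stateful mode-toggling scan (mutable parity flag flipped on each '1' character, per-index parity test, conditional append) by a derived stateless closed form: a char is kept exactly when it is not a '1' and is preceded by an even number of non-'1' chars, so B is just code.replace('1','')[::2], i.e. delete-then-stride.
import Mathlib
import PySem

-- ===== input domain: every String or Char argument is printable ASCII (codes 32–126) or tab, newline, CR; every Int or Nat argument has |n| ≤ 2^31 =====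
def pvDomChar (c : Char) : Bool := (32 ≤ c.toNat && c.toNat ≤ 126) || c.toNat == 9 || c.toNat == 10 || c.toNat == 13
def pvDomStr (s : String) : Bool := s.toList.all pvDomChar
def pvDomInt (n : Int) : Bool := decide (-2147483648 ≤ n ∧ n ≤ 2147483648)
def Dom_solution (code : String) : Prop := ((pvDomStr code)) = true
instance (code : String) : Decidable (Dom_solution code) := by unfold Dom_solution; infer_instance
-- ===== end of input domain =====

-- B replaces A's stateful mode-toggling scan by a stateless closed form — delete every '1',
-- then take every other remaining char — which a timing run also measured as faster (constant factor).

-- ===== PORT A =====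
-- A's loop: state (answer, mode); toggle mode on '1', append val when idx parity matches mode.
def pvLoopA : List (Int × Char) → List Char → Int → List Char × Int
  | [], ans, mode => (ans, mode)
  | (i, c) :: rest, ans, mode =>
    let m := if c = '1' then (if mode = 1 then 0 else 1) else mode
    let a :=
      if m = 0 then (if PySem.Int.mod i 2 = 0 ∧ c ≠ '1' then ans ++ [c] else ans)
      else (if PySem.Int.mod i 2 = 1 ∧ c ≠ '1' then ans ++ [c] else ans)
    pvLoopA rest a m

def solution (code : String) : String :=
  let r := pvLoopA (PySem.List.enumerate code.toList) [] 0
  if r.1 ≠ [] then String.ofList r.1 else "EMPTY"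

-- ===== PORT B =====
-- Source B: kept = code.replace('1','')[::2]; return kept if kept else 'EMPTY'.
-- (step-2 slice never yields none since 2 ≠ 0, so getD [] is exact)
def solution_alt (code : String) : String :=
  let kept := (PySem.Chars.slice? (PySem.Chars.replace code.toList ['1'] []) none none 2).getD []
  if kept ≠ [] then String.ofList kept else "EMPTY"

-- ===== PRECONDITION & SPEC =====
def Spec_solution (code : String) (out : String) : Prop := out = solution_alt code
instance (code : String) (out : String) : Decidable (Spec_solution code out) := by unfold Spec_solution; infer_instance

-- ===== CLAIM (what is proved, stated in full; the proofs are below) =====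
def Claim_equal_solution : Prop := ∀ (code : String), Dom_solution code → Spec_solution code (solution code)

-- ===== LEMMAS AND PROOFS =====

-- every other element (indices 0, 2, 4, ...): the reference both sides are reduced to
def pvEveryOther {α : Type} : List α → List α
  | [] => []
  | [a] => [a]
  | a :: _ :: t => a :: pvEveryOther t

lemma eo_aux {α : Type} : ∀ (l : List α),
    (List.range ((l.length + 1) / 2)).filterMap (fun (k : Nat) => l[2 * k]?) = pvEveryOther l := by
  intro l
  induction l using pvEveryOther.induct with
  | case1 => simp [pvEveryOther]
  | case2 a => simp [pvEveryOther, List.range_succ]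
  | case3 a b t ih =>
    have hlen : (((a :: b :: t).length + 1) / 2) = (t.length + 1) / 2 + 1 := by
      simp [List.length_cons]; omega
    rw [hlen, List.range_succ_eq_map, List.filterMap_cons, List.filterMap_map]
    simp only [pvEveryOther]
    norm_num
    rw [← ih]
    apply List.filterMap_congr
    intro k hk
    have h : 2 * (k + 1) = 2 * k + 2 := by omega
    simp [h]

lemma slice2_everyOther {α : Type} (l : List α) :
    PySem.List.slice? l none none 2 = some (pvEveryOther l) := by
  rw [← eo_aux]
  simp only [PySem.List.slice?, PySem.List.sliceIndices]
  norm_num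
  have hc : (if 0 < l.length then (((l.length : Int) + 2 - 1) / 2).toNat else 0) = (l.length + 1) / 2 := by
    split <;> omega
  rw [hc]
  apply List.filterMap_congr
  intro k hk
  have h : ((0 : Int) + 2 * (k : Int)).toNat = 2 * k := by omega
  norm_num at h ⊢
  rw [h]

lemma replace_go_filter : ∀ (fuel : Nat) (l acc : List Char), l.length ≤ fuel →
    PySem.Chars.replace.go ['1'] [] fuel l acc = acc.reverse ++ l.filter (· ≠ '1') := by
  intro fuel
  induction fuel with
  | zero =>
    intro l acc h
    have : l = [] := by cases l <;> simp_all
    subst this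
    simp [PySem.Chars.replace.go]
  | succ n ih =>
    intro l acc h
    cases l with
    | nil => simp [PySem.Chars.replace.go]
    | cons c t =>
      simp only [PySem.Chars.replace.go]
      by_cases hc : c = '1'
      · subst hc
        have hp : List.isPrefixOf ['1'] ('1' :: t) = true := by simp [List.isPrefixOf]
        rw [if_pos hp]
        rw [ih _ _ (by simp at h ⊢; omega)]
        simp
      · have hp : List.isPrefixOf ['1'] (c :: t) = false := by
          simp [List.isPrefixOf]; exact fun h' => hc h'.symm
        rw [if_neg (by simp [hp])]
        rw [ih _ _ (by simp at h ⊢; omega)]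
        simp [hc]

lemma replace_one_filter (l : List Char) :
    PySem.Chars.replace l ['1'] [] = l.filter (· ≠ '1') := by
  simp only [PySem.Chars.replace]
  norm_num
  rw [replace_go_filter l.length l [] le_rfl]; simp

lemma eo_cons {α : Type} (a : α) (t : List α) :
    pvEveryOther (a :: t) = a :: pvEveryOther (t.drop 1) := by
  cases t <;> simp [pvEveryOther]

lemma pvLoopA_char : ∀ (l : List Char) (i : Int) (ans : List Char) (m : Int), (m = 0 ∨ m = 1) →
    (pvLoopA (PySem.List.enumerate l i) ans m).1 =
      ans ++ (if PySem.Int.mod i 2 = m then pvEveryOther (l.filter (· ≠ '1'))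
              else pvEveryOther ((l.filter (· ≠ '1')).drop 1)) := by
  intro l
  induction l with
  | nil => intro i ans m _; simp [PySem.List.enumerate_nil, pvLoopA, pvEveryOther]
  | cons c rest ih =>
    intro i ans m hm
    rw [PySem.List.enumerate_cons]
    show (pvLoopA ((i, c) :: PySem.List.enumerate rest (i + 1)) ans m).1 = _
    have hm0 : (0:Int) ≤ PySem.Int.mod i 2 := PySem.Int.mod_nonneg i (by norm_num)
    have hm1 : PySem.Int.mod i 2 < 2 := PySem.Int.mod_lt i (by norm_num)
    have hflip : PySem.Int.mod (i + 1) 2 = 1 - PySem.Int.mod i 2 := by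
      have h1 := PySem.Int.floordiv_mul_add_mod i 2
      have h2 := PySem.Int.floordiv_mul_add_mod (i + 1) 2
      have h3 : (0:Int) ≤ PySem.Int.mod (i+1) 2 := PySem.Int.mod_nonneg _ (by norm_num)
      have h4 : PySem.Int.mod (i+1) 2 < 2 := PySem.Int.mod_lt _ (by norm_num)
      omega
    simp only [pvLoopA]
    by_cases hc : c = '1'
    · subst hc
      have ha : (if (if ('1':Char) = '1' then (if m = 1 then (0:Int) else 1) else m) = 0
            then (if PySem.Int.mod i 2 = 0 ∧ ('1':Char) ≠ '1' then ans ++ ['1'] else ans)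
            else (if PySem.Int.mod i 2 = 1 ∧ ('1':Char) ≠ '1' then ans ++ ['1'] else ans)) = ans := by
        split_ifs <;> simp_all
      rw [ha]
      have hm' : ((if m = 1 then (0:Int) else 1) = 0 ∨ (if m = 1 then (0:Int) else 1) = 1) := by
        rcases hm with h | h <;> simp [h]
      have hmt : (if ('1':Char) = '1' then (if m = 1 then (0:Int) else 1) else m) = (if m = 1 then (0:Int) else 1) := by simp
      rw [hmt, ih _ _ _ hm']
      have hfil : (('1' :: rest).filter (· ≠ '1')) = rest.filter (· ≠ '1') := by simp
      rw [hfil]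
      congr 1
      rcases hm with h | h <;> subst h <;> rw [hflip] <;> split_ifs <;> first | rfl | omega
    · have hmm : (if c = '1' then (if m = 1 then (0:Int) else 1) else m) = m := by simp [hc]
      rw [hmm]
      have hfil : ((c :: rest).filter (· ≠ '1')) = c :: rest.filter (· ≠ '1') := by simp [hc]
      by_cases hi : PySem.Int.mod i 2 = m
      · -- emit
        have hbranch : (if m = 0 then (if PySem.Int.mod i 2 = 0 ∧ c ≠ '1' then ans ++ [c] else ans)
            else (if PySem.Int.mod i 2 = 1 ∧ c ≠ '1' then ans ++ [c] else ans)) = ans ++ [c] := by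
          rcases hm with h | h <;> subst h
          · rw [if_pos rfl, if_pos ⟨hi, hc⟩]
          · rw [if_neg (by norm_num), if_pos ⟨hi, hc⟩]
        rw [hbranch, ih _ _ _ hm]
        have hnext : ¬ PySem.Int.mod (i+1) 2 = m := by rw [hflip]; omega
        rw [if_neg hnext, if_pos hi, hfil, eo_cons]
        simp
      · -- skip
        have hbranch : (if m = 0 then (if PySem.Int.mod i 2 = 0 ∧ c ≠ '1' then ans ++ [c] else ans)
            else (if PySem.Int.mod i 2 = 1 ∧ c ≠ '1' then ans ++ [c] else ans)) = ans := by
          rcases hm with h | h <;> subst h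
          · rw [if_pos rfl, if_neg (by exact fun hh => hi hh.1)]
          · rw [if_neg (by norm_num), if_neg (by exact fun hh => hi hh.1)]
        rw [hbranch, ih _ _ _ hm]
        have hnext : PySem.Int.mod (i+1) 2 = m := by rw [hflip]; omega
        rw [if_pos hnext, if_neg hi, hfil]
        cases hrest : rest.filter (· ≠ '1') <;> simp [pvEveryOther]

theorem solution_eq_alt (code : String) : solution code = solution_alt code := by
  unfold solution solution_alt
  have hA := pvLoopA_char code.toList 0 [] 0 (Or.inl rfl)
  have he : PySem.List.enumerate code.toList = PySem.List.enumerate code.toList 0 := rfl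
  simp only []
  rw [hA, replace_one_filter]
  simp only [PySem.Chars.slice?_eq_listSlice?]
  rw [slice2_everyOther]
  simp

-- ===== VERDICT (by name: the statement is the Claim_ definition above) =====
theorem solution_spec : Claim_equal_solution := by
  intro code _
  unfold Spec_solution
  exact solution_eq_alt code
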